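-- pv_equiv track=rewrite | github.com/mahboobehad/machine-learning-homeworks | utils.py | diamond_neighbourhood
-- ===== SOURCE A (Python) =====
-- def diamond_neighbourhood(center, number_of_columns, number_of_rows):
--     def find_point():
--         # this function solves m * j + i = center
--         for i in range(number_of_rows):
--             for j in range(number_of_columns):
--                 if number_of_rows * j + i == center:
--                     return i, j
--
--     def is_in_matrix(p):
--         return 0 <= p[0] < number_of_rows and 0 <= p[1] < number_of_columns
--
--     x, y = find_point()
--
--     neighbours = list(
--         map(lambda p: number_of_rows * p[1] + p[0],
--             list(filter(is_in_matrix, [(x + 1, y), (x - 1, y), (x, y), (x, y + 1), (x, y - 1)]))))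
--     return neighbours
-- ===== SOURCE B (Python) =====
-- def diamond_neighbourhood(center, number_of_columns, number_of_rows):
--     # O(1): the unique cell (i, j) with number_of_rows*j + i == center is obtained by
--     # divmod instead of scanning the whole matrix.
--     x = center % number_of_rows
--     y = center // number_of_rows
--     if not (0 <= x < number_of_rows and 0 <= y < number_of_columns):
--         raise ValueError("center is not the linear index of a matrix cell")
--     neighbours = []
--     for px, py in ((x + 1, y), (x - 1, y), (x, y), (x, y + 1), (x, y - 1)):
--         if 0 <= px < number_of_rows and 0 <= py < number_of_columns:
--             neighbours.append(number_of_rows * py + px)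
--     return neighbours
-- ===== Notes on version B (the rewrite author's own statement) =====
-- stated objective: faster
-- what changed: Replaces A's nested scan over all rows*cols index pairs to invert center = rows*j + i with direct divmod arithmetic (i = center % rows, j = center // rows), and builds the neighbour list in one loop instead of map over filter.
import Mathlib
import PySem

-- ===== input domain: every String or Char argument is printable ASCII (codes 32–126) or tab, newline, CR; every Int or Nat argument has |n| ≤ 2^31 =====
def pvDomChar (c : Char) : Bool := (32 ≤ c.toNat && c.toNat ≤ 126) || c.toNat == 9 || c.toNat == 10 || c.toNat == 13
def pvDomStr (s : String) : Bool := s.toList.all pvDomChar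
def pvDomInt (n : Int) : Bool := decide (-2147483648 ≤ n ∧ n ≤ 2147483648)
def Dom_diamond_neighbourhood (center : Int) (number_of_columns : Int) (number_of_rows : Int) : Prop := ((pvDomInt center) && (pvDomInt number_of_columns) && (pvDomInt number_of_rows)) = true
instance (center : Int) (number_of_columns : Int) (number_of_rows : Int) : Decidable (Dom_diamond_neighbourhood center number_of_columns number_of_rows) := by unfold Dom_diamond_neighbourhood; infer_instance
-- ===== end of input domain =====

-- B replaces A's O(rows*cols) scan for the cell coordinates with O(1) divmod arithmetic
-- and builds the neighbour list in a single loop (objective: faster, asymptotically).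

-- ===== PORT A =====
-- A's find_point: 'for i in range(rows): for j in range(cols): if rows*j+i == center: return i, j';
-- each 'for' with early 'return' becomes a recursion on the same counter; none = fell through (Python returns None).
def pvFindJ (center : Int) (number_of_rows : Int) (i : Int) (number_of_columns : Int) (j : Int) : Option Int :=
  if h : j < number_of_columns then
    if number_of_rows * j + i == center then some j
    else pvFindJ center number_of_rows i number_of_columns (j + 1)
  else none
termination_by (number_of_columns - j).toNat
decreasing_by omega

def pvFindI (center : Int) (number_of_columns : Int) (number_of_rows : Int) (i : Int) : Option (Int × Int) :=
  if _h : i < number_of_rows then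
    match pvFindJ center number_of_rows i number_of_columns 0 with
    | some j => some (i, j)
    | none => pvFindI center number_of_columns number_of_rows (i + 1)
  else none
termination_by (number_of_rows - i).toNat
decreasing_by omega

def diamond_neighbourhood (center : Int) (number_of_columns : Int) (number_of_rows : Int) : List Int :=
  match pvFindI center number_of_columns number_of_rows 0 with
  | none => []  -- Python raises TypeError here (unpacking None); excluded by Pre_
  | some (x, y) =>
      ([(x + 1, y), (x - 1, y), (x, y), (x, y + 1), (x, y - 1)].filter
          (fun p => decide (0 ≤ p.1 ∧ p.1 < number_of_rows ∧ 0 ≤ p.2 ∧ p.2 < number_of_columns))).map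
        (fun p => number_of_rows * p.2 + p.1)

-- ===== PORT B =====
def diamond_neighbourhood_alt (center : Int) (number_of_columns : Int) (number_of_rows : Int) : List Int :=
  let x := PySem.Int.mod center number_of_rows
  let y := PySem.Int.floordiv center number_of_rows
  if 0 ≤ x ∧ x < number_of_rows ∧ 0 ≤ y ∧ y < number_of_columns then
    [(x + 1, y), (x - 1, y), (x, y), (x, y + 1), (x, y - 1)].foldl
      (fun acc p =>
        if 0 ≤ p.1 ∧ p.1 < number_of_rows ∧ 0 ≤ p.2 ∧ p.2 < number_of_columns then
          acc ++ [number_of_rows * p.2 + p.1]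
        else acc) []
  else []  -- Python B raises ValueError here (and ZeroDivisionError when rows = 0); excluded by Pre_

-- ===== PRECONDITION & SPEC =====
-- Exactly the inputs where A's find_point succeeds; otherwise Python A raises TypeError
-- (unpacking None, or the empty ranges when rows ≤ 0).
def Pre_diamond_neighbourhood (center : Int) (number_of_columns : Int) (number_of_rows : Int) : Prop :=
  1 ≤ number_of_rows ∧ 0 ≤ center ∧ PySem.Int.floordiv center number_of_rows < number_of_columns

instance (center : Int) (number_of_columns : Int) (number_of_rows : Int) : Decidable (Pre_diamond_neighbourhood center number_of_columns number_of_rows) := by unfold Pre_diamond_neighbourhood; infer_instance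

def pvWitness_diamond_neighbourhood : Int × Int × Int := (5, 3, 3)

def Spec_diamond_neighbourhood (center : Int) (number_of_columns : Int) (number_of_rows : Int) (out : List Int) : Prop := out = diamond_neighbourhood_alt center number_of_columns number_of_rows
instance (center : Int) (number_of_columns : Int) (number_of_rows : Int) (out : List Int) : Decidable (Spec_diamond_neighbourhood center number_of_columns number_of_rows out) := by unfold Spec_diamond_neighbourhood; infer_instance

-- ===== CLAIM (what is proved, stated in full; the proofs are below) =====
def Claim_equal_diamond_neighbourhood : Prop := ∀ (center : Int) (number_of_columns : Int) (number_of_rows : Int), Dom_diamond_neighbourhood center number_of_columns number_of_rows → Pre_diamond_neighbourhood center number_of_columns number_of_rows → Spec_diamond_neighbourhood center number_of_columns number_of_rows (diamond_neighbourhood center number_of_columns number_of_rows)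


-- ===== LEMMAS AND PROOFS =====

-- proof-side reformulation of A's nested loops as searches over pyRange lists
def pvFindPoint (center : Int) (number_of_columns : Int) (number_of_rows : Int) : Option (Int × Int) :=
  (PySem.List.pyRange 0 number_of_rows 1).findSome? (fun i =>
    ((PySem.List.pyRange 0 number_of_columns 1).find?
        (fun j => number_of_rows * j + i == center)).map (fun j => (i, j)))

theorem pvFindJ_eq (c rows i cols j : Int) :
    pvFindJ c rows i cols j = (PySem.List.pyRange j cols 1).find? (fun t => rows * t + i == c) := by
  fun_induction pvFindJ c rows i cols j with
  | case1 j h hhit =>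
    rw [PySem.List.pyRange_one_cons h]
    simp [hhit]
  | case2 j h hmiss ih =>
    rw [PySem.List.pyRange_one_cons h]
    simp only [List.find?_cons, hmiss]
    exact ih
  | case3 j h =>
    rw [PySem.List.pyRange_one_eq_nil (show cols ≤ j by omega)]
    rfl

theorem pvFindI_eq (c cols rows i : Int) :
    pvFindI c cols rows i =
      (PySem.List.pyRange i rows 1).findSome? (fun t =>
        ((PySem.List.pyRange 0 cols 1).find? (fun j => rows * j + t == c)).map (fun j => (t, j))) := by
  fun_induction pvFindI c cols rows i with
  | case1 i h j hj =>
    rw [PySem.List.pyRange_one_cons h, List.findSome?_cons, ← pvFindJ_eq, hj]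
    rfl
  | case2 i h hj ih =>
    rw [PySem.List.pyRange_one_cons h, List.findSome?_cons, ← pvFindJ_eq, hj]
    exact ih
  | case3 i h =>
    rw [PySem.List.pyRange_one_eq_nil (show rows ≤ i by omega)]
    rfl

-- find? of a predicate with at most one solution j0 in L
theorem pv_find?_unique (L : List Int) (p : Int → Bool) (j0 : Int)
    (h : ∀ j ∈ L, p j = true → j = j0) :
    L.find? p = if j0 ∈ L ∧ p j0 = true then some j0 else none := by
  induction L with
  | nil => simp
  | cons a t ih =>
    by_cases hpa : p a = true
    · have ha : a = j0 := h a List.mem_cons_self hpa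
      subst ha
      simp [hpa]
    · have ihs := ih (fun j hj hpj => h j (List.mem_cons_of_mem a hj) hpj)
      rw [List.find?_cons_of_neg (by simpa using hpa), ihs]
      by_cases hja : j0 = a
      · subst hja
        simp [hpa]
      · simp [List.mem_cons, hja]

-- findSome? where f is none except possibly at i0
theorem pv_findSome?_unique {β : Type} (L : List Int) (f : Int → Option β) (i0 : Int)
    (h : ∀ i ∈ L, i ≠ i0 → f i = none) :
    L.findSome? f = if i0 ∈ L then f i0 else none := by
  induction L with
  | nil => simp
  | cons a t ih =>
    rw [List.findSome?_cons]
    have iht := ih (fun i hi hne => h i (List.mem_cons_of_mem a hi) hne)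
    by_cases hja : a = i0
    · subst hja
      cases hfa : f a with
      | some b => simp
      | none =>
        simp only
        rw [iht]
        by_cases h0 : a ∈ t <;> simp [h0, hfa]
    · rw [h a List.mem_cons_self hja, iht]
      have hmem : (i0 ∈ a :: t) ↔ i0 ∈ t := by
        simp only [List.mem_cons, or_iff_right_iff_imp]
        intro he; exact absurd he.symm hja
      by_cases h0 : i0 ∈ t <;> simp [hmem, h0]

theorem pv_findPoint_eq (c cols rows : Int) (h1 : 0 < rows) (h2 : 0 ≤ c)
    (h3 : c / rows < cols) :
    pvFindPoint c cols rows = some (c % rows, c / rows) := by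
  unfold pvFindPoint
  have hmod0 : 0 ≤ c % rows := Int.emod_nonneg c (by omega)
  have hmodlt : c % rows < rows := Int.emod_lt_of_pos c h1
  have hdiv0 : 0 ≤ c / rows := Int.ediv_nonneg h2 (by omega)
  have hdm : rows * (c / rows) + c % rows = c := Int.mul_ediv_add_emod c rows
  rw [pv_findSome?_unique _ _ (c % rows) ?hnone]
  case hnone =>
    intro i hi hne
    rw [PySem.List.mem_pyRange_one] at hi
    have hf : (PySem.List.pyRange 0 cols 1).find? (fun j => rows * j + i == c) = none := by
      apply List.find?_eq_none.mpr
      intro j _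
      simp only [beq_iff_eq]
      intro heq
      apply hne
      have h2' : (rows * j + i) % rows = i := by
        rw [Int.add_comm, Int.add_mul_emod_self_left]
        exact Int.emod_eq_of_lt hi.1 hi.2
      rw [← heq, h2']
    rw [hf]; rfl
  · rw [if_pos (by rw [PySem.List.mem_pyRange_one]; omega)]
    rw [pv_find?_unique _ _ (c / rows) ?huni]
    case huni =>
      intro j hj hpj
      simp only [beq_iff_eq] at hpj
      have : rows * j = rows * (c / rows) := by omega
      exact mul_left_cancel₀ (by omega : rows ≠ 0) this
    rw [if_pos ⟨by rw [PySem.List.mem_pyRange_one]; omega,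
        by simp only [beq_iff_eq]; exact hdm⟩]
    rfl

-- the single B loop equals A's map-over-filter
theorem pv_foldl_filter_map (cols rows : Int) (L : List (Int × Int)) (acc : List Int) :
    L.foldl
      (fun acc p =>
        if 0 ≤ p.1 ∧ p.1 < rows ∧ 0 ≤ p.2 ∧ p.2 < cols then acc ++ [rows * p.2 + p.1]
        else acc) acc
    = acc ++ (L.filter (fun p => decide (0 ≤ p.1 ∧ p.1 < rows ∧ 0 ≤ p.2 ∧ p.2 < cols))).map
        (fun p => rows * p.2 + p.1) := by
  induction L generalizing acc with
  | nil => simp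
  | cons a t ih =>
    by_cases h : 0 ≤ a.1 ∧ a.1 < rows ∧ 0 ≤ a.2 ∧ a.2 < cols
    · simp [List.foldl_cons, h, ih]
    · simp [List.foldl_cons, h, ih]

-- ===== VERDICT (by name: the statement is the Claim_ definition above) =====
theorem diamond_neighbourhood_spec : Claim_equal_diamond_neighbourhood := by
  intro c cols rows _ hpre
  obtain ⟨h1, h2, h3⟩ := hpre
  rw [PySem.Int.floordiv_eq_ediv_of_pos (by omega)] at h3
  unfold Spec_diamond_neighbourhood diamond_neighbourhood diamond_neighbourhood_alt
  rw [pvFindI_eq, ← pvFindPoint, pv_findPoint_eq c cols rows (by omega) h2 h3]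
  rw [PySem.Int.mod_eq_emod_of_pos (by omega), PySem.Int.floordiv_eq_ediv_of_pos (by omega)]
  rw [if_pos (by
    refine ⟨Int.emod_nonneg c (by omega), Int.emod_lt_of_pos c (by omega),
      Int.ediv_nonneg h2 (by omega), h3⟩)]
  rw [pv_foldl_filter_map]
  simp
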